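-- pv_equiv track=rewrite | github.com/Rexchan06/medical-doc-query-ai | document_processor.py | _check_drug_class_interactions
-- ===== SOURCE A (Python) =====
-- from typing import Dict, List, Tuple, Optional
--
-- def _check_drug_class_interactions(med1: str, med2: str) -> Optional[Dict]:
--     """
--     Check for drug class interactions (simplified for hackathon)
--     Can be expanded with comprehensive drug interaction database
--     """
--
--     # Blood thinners interaction
--     blood_thinners = ['warfarin', 'heparin', 'aspirin', 'clopidogrel']
--     if any(bt in med1 for bt in blood_thinners) and any(bt in med2 for bt in blood_thinners):
--         return {
--             'severity': 'HIGH',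
--             'risk': 'Increased bleeding risk from multiple anticoagulants',
--             'action': 'Review anticoagulation strategy, monitor bleeding parameters'
--         }
--
--     # Diabetes medications
--     diabetes_meds = ['metformin', 'insulin', 'glipizide', 'glyburide']
--     if any(dm in med1 for dm in diabetes_meds) and any(dm in med2 for dm in diabetes_meds):
--         return {
--             'severity': 'MEDIUM',
--             'risk': 'Potential hypoglycemia from multiple diabetes medications',
--             'action': 'Monitor blood glucose levels closely'
--         }
--
--     return None
-- ===== SOURCE B (Python) =====
-- from typing import Dict, List, Tuple, Optional
--
-- # Flat keyword -> drug-class index map; class 0 = blood thinners, class 1 = diabetes meds.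
-- _KEYWORD_CLASS = [
--     ('warfarin', 0), ('heparin', 0), ('aspirin', 0), ('clopidogrel', 0),
--     ('metformin', 1), ('insulin', 1), ('glipizide', 1), ('glyburide', 1),
-- ]
--
-- _CLASS_RESULTS = [
--     {
--         'severity': 'HIGH',
--         'risk': 'Increased bleeding risk from multiple anticoagulants',
--         'action': 'Review anticoagulation strategy, monitor bleeding parameters'
--     },
--     {
--         'severity': 'MEDIUM',
--         'risk': 'Potential hypoglycemia from multiple diabetes medications',
--         'action': 'Monitor blood glucose levels closely'
--     },
-- ]
--
-- def _class_mask(med: str) -> int: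
--     """Bitmask of the drug classes whose keywords occur in med."""
--     mask = 0
--     for word, cls in _KEYWORD_CLASS:
--         if word in med:
--             mask |= 1 << cls
--     return mask
--
-- def _check_drug_class_interactions(med1: str, med2: str):
--     # Classify each medication independently, then intersect the class sets;
--     # the lowest shared class index (= original rule order) decides the result.
--     common = _class_mask(med1) & _class_mask(med2)
--     for cls, result in enumerate(_CLASS_RESULTS):
--         if (common >> cls) & 1:
--             return result
--     return None
-- ===== Notes on version B (the rewrite author's own statement) =====
-- stated objective: alternative
-- what changed: Instead of testing each rule's keyword list pairwise against both strings, B classifies each medication string independently into a bitmask of drug classes via one flat keyword-to-class map, intersects the two bitmasks, and returns the result for the lowest shared class bit.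
import Mathlib
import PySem

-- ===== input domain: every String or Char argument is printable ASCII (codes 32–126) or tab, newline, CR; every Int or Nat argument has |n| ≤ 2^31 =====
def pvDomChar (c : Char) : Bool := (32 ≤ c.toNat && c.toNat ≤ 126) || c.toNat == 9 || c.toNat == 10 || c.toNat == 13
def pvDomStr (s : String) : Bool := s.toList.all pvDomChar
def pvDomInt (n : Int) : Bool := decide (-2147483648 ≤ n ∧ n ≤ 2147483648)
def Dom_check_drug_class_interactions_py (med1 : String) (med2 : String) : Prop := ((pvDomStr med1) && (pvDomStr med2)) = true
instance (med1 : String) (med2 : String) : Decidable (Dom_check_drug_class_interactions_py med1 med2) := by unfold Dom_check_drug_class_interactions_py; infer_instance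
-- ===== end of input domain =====

-- B classifies each string independently into a bitmask of drug classes and intersects the masks,
-- instead of A's per-rule pairwise keyword tests (objective: alternative).

-- ===== PORT A =====
def check_drug_class_interactions_py (med1 : String) (med2 : String) : Option (List (String × String)) :=
  let blood_thinners : List String := ["warfarin", "heparin", "aspirin", "clopidogrel"]
  if blood_thinners.any (fun bt => PySem.Str.isIn bt med1) &&
     blood_thinners.any (fun bt => PySem.Str.isIn bt med2) then
    some [("severity", "HIGH"),
          ("risk", "Increased bleeding risk from multiple anticoagulants"),
          ("action", "Review anticoagulation strategy, monitor bleeding parameters")]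
  else
    let diabetes_meds : List String := ["metformin", "insulin", "glipizide", "glyburide"]
    if diabetes_meds.any (fun dm => PySem.Str.isIn dm med1) &&
       diabetes_meds.any (fun dm => PySem.Str.isIn dm med2) then
      some [("severity", "MEDIUM"),
            ("risk", "Potential hypoglycemia from multiple diabetes medications"),
            ("action", "Monitor blood glucose levels closely")]
    else
      none

-- ===== PORT B =====
def pvKeywordClass : List (String × Nat) :=
  [("warfarin", 0), ("heparin", 0), ("aspirin", 0), ("clopidogrel", 0),
   ("metformin", 1), ("insulin", 1), ("glipizide", 1), ("glyburide", 1)]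

def pvClassResults : List (List (String × String)) :=
  [ [("severity", "HIGH"),
     ("risk", "Increased bleeding risk from multiple anticoagulants"),
     ("action", "Review anticoagulation strategy, monitor bleeding parameters")],
    [("severity", "MEDIUM"),
     ("risk", "Potential hypoglycemia from multiple diabetes medications"),
     ("action", "Monitor blood glucose levels closely")] ]

-- bitmask of the drug classes whose keywords occur in med (Source B's _class_mask)
def pvClassMask (med : String) : Nat :=
  pvKeywordClass.foldl
    (fun mask p => if PySem.Str.isIn p.1 med then mask ||| (1 <<< p.2) else mask) 0

-- Source B's `for cls, result in enumerate(_CLASS_RESULTS)` loop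
def pvPickResult (common : Nat) :
    List (Int × List (String × String)) → Option (List (String × String))
  | [] => none
  | (cls, result) :: rest =>
      if (common >>> cls.toNat) &&& 1 ≠ 0 then some result
      else pvPickResult common rest

def check_drug_class_interactions_py_alt (med1 : String) (med2 : String) : Option (List (String × String)) :=
  let common := pvClassMask med1 &&& pvClassMask med2
  pvPickResult common (PySem.List.enumerate pvClassResults)

-- ===== PRECONDITION & SPEC =====
def Spec_check_drug_class_interactions_py (med1 : String) (med2 : String) (out : Option (List (String × String))) : Prop := out = check_drug_class_interactions_py_alt med1 med2
instance (med1 : String) (med2 : String) (out : Option (List (String × String))) : Decidable (Spec_check_drug_class_interactions_py med1 med2 out) := by unfold Spec_check_drug_class_interactions_py; infer_instance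

-- ===== CLAIM (what is proved, stated in full; the proofs are below) =====
def Claim_equal_check_drug_class_interactions_py : Prop := ∀ (med1 : String) (med2 : String), Dom_check_drug_class_interactions_py med1 med2 → Spec_check_drug_class_interactions_py med1 med2 (check_drug_class_interactions_py med1 med2)

-- ===== LEMMAS AND PROOFS =====
theorem pvClassMask_eq (med : String) :
    pvClassMask med =
      (if (["warfarin", "heparin", "aspirin", "clopidogrel"] : List String).any
            (fun w => PySem.Str.isIn w med) then 1 else 0) +
      (if (["metformin", "insulin", "glipizide", "glyburide"] : List String).any
            (fun w => PySem.Str.isIn w med) then 2 else 0) := by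
  unfold pvClassMask pvKeywordClass
  simp only [List.foldl, List.any]
  by_cases h1 : PySem.Str.isIn "warfarin" med = true <;>
  by_cases h2 : PySem.Str.isIn "heparin" med = true <;>
  by_cases h3 : PySem.Str.isIn "aspirin" med = true <;>
  by_cases h4 : PySem.Str.isIn "clopidogrel" med = true <;>
  by_cases h5 : PySem.Str.isIn "metformin" med = true <;>
  by_cases h6 : PySem.Str.isIn "insulin" med = true <;>
  by_cases h7 : PySem.Str.isIn "glipizide" med = true <;>
  by_cases h8 : PySem.Str.isIn "glyburide" med = true <;>
  simp_all

-- ===== VERDICT (by name: the statement is the Claim_ definition above) =====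
theorem check_drug_class_interactions_py_spec : Claim_equal_check_drug_class_interactions_py := by
  intro med1 med2 _
  unfold Spec_check_drug_class_interactions_py check_drug_class_interactions_py
    check_drug_class_interactions_py_alt
  rw [pvClassMask_eq med1, pvClassMask_eq med2]
  by_cases hA1 : (["warfarin", "heparin", "aspirin", "clopidogrel"] : List String).any
      (fun w => PySem.Str.isIn w med1) = true <;>
  by_cases hA2 : (["metformin", "insulin", "glipizide", "glyburide"] : List String).any
      (fun w => PySem.Str.isIn w med1) = true <;>
  by_cases hB1 : (["warfarin", "heparin", "aspirin", "clopidogrel"] : List String).any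
      (fun w => PySem.Str.isIn w med2) = true <;>
  by_cases hB2 : (["metformin", "insulin", "glipizide", "glyburide"] : List String).any
      (fun w => PySem.Str.isIn w med2) = true <;>
  simp_all [pvPickResult, PySem.List.enumerate, pvClassResults]
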